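-- pv_equiv track=rewrite | github.com/namcodog/RedditSignalScanner | backend/scripts/generate_t1_market_report.py | _pick_relevant_subreddits
-- ===== SOURCE A (Python) =====
-- def _pick_relevant_subreddits(relevance_map: dict[str, int], limit: int = 120) -> list[str]:
--     """Normalize and limit subreddits for downstream stats computation."""
--     if not relevance_map:
--         return []
--     ordered = sorted(relevance_map.items(), key=lambda x: x[1], reverse=True)
--     picked: list[str] = []
--     seen: set[str] = set()
--     for name, _ in ordered:
--         norm = (name or "").strip().lower()
--         if not norm:
--             continue
--         if not norm.startswith("r/"):
--             norm = f"r/{norm}"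
--         if norm in seen:
--             continue
--         picked.append(norm)
--         seen.add(norm)
--         if len(picked) >= limit:
--             break
--     return picked
-- ===== SOURCE B (Python) =====
-- def _pick_relevant_subreddits(relevance_map: dict[str, int], limit: int = 120) -> list[str]:
--     """Dedup into a best-record dict first, then sort the distinct records once."""
--     best: dict[str, tuple[int, int]] = {}
--     for idx, (name, rel) in enumerate(relevance_map.items()):
--         norm = name.strip().lower()
--         if not norm:
--             continue
--         if not norm.startswith("r/"):
--             norm = "r/" + norm
--         cur = best.get(norm)
--         if cur is None or rel > cur[0]:
--             best[norm] = (rel, idx)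
--     ranked = sorted(best.items(), key=lambda kv: (-kv[1][0], kv[1][1]))
--     picked: list[str] = []
--     for norm, _ in ranked:
--         picked.append(norm)
--         if len(picked) >= limit:
--             break
--     return picked
-- ===== Notes on version B (the rewrite author's own statement) =====
-- stated objective: alternative
-- what changed: A sorts all items by relevance and then walks the sorted list normalizing names, deduplicating through a seen-set and breaking at the limit; B instead makes one insertion-order pass collecting, per normalized name, its best (relevance, first index attaining it) record in a dict, then sorts only the distinct records by (-relevance, first index) and emits their names up to the limit.
import Mathlib
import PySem

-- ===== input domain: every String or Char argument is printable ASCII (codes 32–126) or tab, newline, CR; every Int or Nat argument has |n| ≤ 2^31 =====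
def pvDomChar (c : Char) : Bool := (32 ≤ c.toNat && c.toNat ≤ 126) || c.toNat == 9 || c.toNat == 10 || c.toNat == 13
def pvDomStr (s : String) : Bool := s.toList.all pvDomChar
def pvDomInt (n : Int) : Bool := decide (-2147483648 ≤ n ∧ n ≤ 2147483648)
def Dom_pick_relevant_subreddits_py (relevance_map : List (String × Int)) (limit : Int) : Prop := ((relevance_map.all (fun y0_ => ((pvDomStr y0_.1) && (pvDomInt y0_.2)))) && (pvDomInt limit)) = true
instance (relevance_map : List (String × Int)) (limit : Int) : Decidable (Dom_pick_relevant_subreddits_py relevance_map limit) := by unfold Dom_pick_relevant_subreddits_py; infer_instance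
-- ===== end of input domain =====

-- B replaces A's sort-then-dedup-walk by one dedup pass into a best-record dict followed by a
-- single sort of the distinct records (objective: alternative decomposition).

-- ===== PORT A =====
-- A's for-loop over the relevance-sorted items: picked/seen accumulators, break when len(picked) >= limit.
def pvLoopA (limit : Int) : List (String × Int) → List String → PySem.Set String → List String
  | [], picked, _seen => picked
  | (name, _) :: rest, picked, seen =>
    let norm0 := PySem.Str.lower (PySem.Str.strip name)
    if norm0 = "" then pvLoopA limit rest picked seen
    else
      let norm := if PySem.Str.startswith norm0 "r/" then norm0 else "r/" ++ norm0
      if PySem.Set.contains seen norm then pvLoopA limit rest picked seen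
      else
        let picked' := picked ++ [norm]
        if limit ≤ (picked'.length : Int) then picked'
        else pvLoopA limit rest picked' (PySem.Set.add seen norm)

def pick_relevant_subreddits_py (relevance_map : List (String × Int)) (limit : Int) : List String :=
  if relevance_map = [] then []
  else
    let ordered := PySem.List.sorted relevance_map (fun x => x.2) true
    pvLoopA limit ordered [] PySem.Set.empty

-- ===== PORT B =====
def pvNormB (name : String) : Option String :=
  let norm := PySem.Str.lower (PySem.Str.strip name)
  if norm = "" then none
  else some (if PySem.Str.startswith norm "r/" then norm else "r/" ++ norm)

-- one step of B's dedup pass: record (relevance, index), updating only on strictly larger relevance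
def pvStepB (d : PySem.Dict String (Int × Int)) (p : Int × (String × Int)) : PySem.Dict String (Int × Int) :=
  match pvNormB p.2.1 with
  | none => d
  | some norm =>
    match d.get? norm with
    | none => d.insert norm (p.2.2, p.1)
    | some cur => if cur.1 < p.2.2 then d.insert norm (p.2.2, p.1) else d

-- B's emission loop: append each ranked name, break once the limit is reached
def pvEmitB (limit : Int) : List String → List String → List String
  | [], picked => picked
  | n :: rest, picked =>
    let picked' := picked ++ [n]
    if limit ≤ (picked'.length : Int) then picked'
    else pvEmitB limit rest picked'

def pick_relevant_subreddits_py_alt (relevance_map : List (String × Int)) (limit : Int) : List String :=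
  let best := (PySem.List.enumerate relevance_map 0).foldl pvStepB PySem.Dict.empty
  let ranked := PySem.List.sorted2 best.items (fun kv => -kv.2.1) (fun kv => kv.2.2) false
  pvEmitB limit (ranked.map (fun kv => kv.1)) []

-- ===== PRECONDITION & SPEC =====
def Spec_pick_relevant_subreddits_py (relevance_map : List (String × Int)) (limit : Int) (out : List String) : Prop := out = pick_relevant_subreddits_py_alt relevance_map limit
instance (relevance_map : List (String × Int)) (limit : Int) (out : List String) : Decidable (Spec_pick_relevant_subreddits_py relevance_map limit out) := by unfold Spec_pick_relevant_subreddits_py; infer_instance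

-- ===== CLAIM (what is proved, stated in full; the proofs are below) =====
def Claim_equal_pick_relevant_subreddits_py : Prop := ∀ (relevance_map : List (String × Int)) (limit : Int), Dom_pick_relevant_subreddits_py relevance_map limit → Spec_pick_relevant_subreddits_py relevance_map limit (pick_relevant_subreddits_py relevance_map limit)

-- ===== LEMMAS AND PROOFS =====

-- lexicographic sort keys: (-relevance, original index)
def pvKey (p : Int × (String × Int)) : Lex (Int × Int) := toLex (-(p.2.2), p.1)
def pvKey' (kv : String × (Int × Int)) : Lex (Int × Int) := toLex (-(kv.2.1), kv.2.2)

-- normalized entry of one enumerated item: (norm, (relevance, index))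
def pvF (p : Int × (String × Int)) : Option (String × (Int × Int)) :=
  (pvNormB p.2.1).map (fun n => (n, (p.2.2, p.1)))

-- first-occurrence-per-name filter (the dedup A performs with its seen set)
def pvFo : PySem.Set String → List (String × (Int × Int)) → List (String × (Int × Int))
  | _, [] => []
  | seen, q :: l =>
    if PySem.Set.contains seen q.1 then pvFo seen l
    else q :: pvFo (PySem.Set.add seen q.1) l

-- running best (max relevance, first index attaining it) over an entry list, for one name
def pvBestL (l : List (String × (Int × Int))) (n : String) : Option (Int × Int) :=
  l.foldl (fun acc q =>
    if q.1 = n then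
      match acc with
      | none => some q.2
      | some c => if c.1 < q.2.1 then some q.2 else acc
    else acc) none


-- first-occurrence-per-name filter on bare names (what A's seen set computes)
def pvDD : PySem.Set String → List String → List String
  | _, [] => []
  | seen, n :: l =>
    if PySem.Set.contains seen n then pvDD seen l
    else n :: pvDD (PySem.Set.add seen n) l

-- ---- A-loop characterisation ----
lemma pvLoopA_eq (limit : Int) :
    ∀ (l : List (String × Int)) (picked : List String) (seen : PySem.Set String),
      (picked.length : Int) < max limit 1 →
      pvLoopA limit l picked seen =
        picked ++ (pvDD seen (l.filterMap (fun q => pvNormB q.1))).take ((max limit 1).toNat - picked.length) := by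
  intro l
  induction l with
  | nil => intro picked seen _; simp [pvLoopA, pvDD]
  | cons hd rest ih =>
    obtain ⟨name, r⟩ := hd
    intro picked seen hlen
    by_cases h0 : PySem.Str.lower (PySem.Str.strip name) = ""
    · have hnb : pvNormB name = none := by simp [pvNormB, h0]
      simp only [pvLoopA, if_pos h0, List.filterMap_cons, hnb]
      exact ih picked seen hlen
    · simp only [pvLoopA, if_neg h0]
      set norm := if PySem.Str.startswith (PySem.Str.lower (PySem.Str.strip name)) "r/" = true
        then PySem.Str.lower (PySem.Str.strip name)
        else "r/" ++ PySem.Str.lower (PySem.Str.strip name) with hnorm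
      have hnb : pvNormB name = some norm := by unfold pvNormB; rw [if_neg h0]
      rw [List.filterMap_cons, hnb]
      by_cases hs : PySem.Set.contains seen norm = true
      · simp only [pvDD, if_pos hs]
        exact ih picked seen hlen
      · simp only [pvDD, if_neg hs, List.length_append, List.length_singleton,
          Nat.cast_add, Nat.cast_one]
        by_cases hbrk : limit ≤ ((picked.length : Int) + 1)
        · have hT : (max limit 1).toNat - picked.length = 1 := by omega
          rw [if_pos hbrk, hT, List.take_succ_cons, List.take_zero]
        · have hlen' : (((picked ++ [norm]).length : Nat) : Int) < max limit 1 := by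
            simp only [List.length_append, List.length_singleton]; push_cast; omega
          have hT : (max limit 1).toNat - picked.length =
              ((max limit 1).toNat - (picked ++ [norm]).length) + 1 := by
            simp only [List.length_append, List.length_singleton]; omega
          rw [if_neg hbrk, ih (picked ++ [norm]) (PySem.Set.add seen norm) hlen', hT,
            List.take_succ_cons]
          simp

-- ---- B-emit-loop characterisation ----
lemma pvEmitB_eq (limit : Int) :
    ∀ (l : List String) (picked : List String),
      (picked.length : Int) < max limit 1 →
      pvEmitB limit l picked = picked ++ l.take ((max limit 1).toNat - picked.length) := by
  intro l
  induction l with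
  | nil => intro picked _; simp [pvEmitB]
  | cons n rest ih =>
    intro picked hlen
    simp only [pvEmitB, List.length_append, List.length_singleton, Nat.cast_add, Nat.cast_one]
    by_cases hbrk : limit ≤ ((picked.length : Int) + 1)
    · have hT : (max limit 1).toNat - picked.length = 1 := by omega
      rw [if_pos hbrk, hT, List.take_succ_cons, List.take_zero]
    · have hlen' : (((picked ++ [n]).length : Nat) : Int) < max limit 1 := by
        simp only [List.length_append, List.length_singleton]; push_cast; omega
      have hT : (max limit 1).toNat - picked.length =
          ((max limit 1).toNat - (picked ++ [n]).length) + 1 := by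
        simp only [List.length_append, List.length_singleton]; omega
      rw [if_neg hbrk, ih (picked ++ [n]) hlen', hT, List.take_succ_cons]
      simp

-- ---- stability: A's reverse sort is the lex sort of the enumeration ----
lemma pvInsertBy_snd (x : String × Int) (n : Int) :
    ∀ (S : List (Int × (String × Int))), (∀ p ∈ S, p.1 < n) →
      PySem.List.insertBy (fun a b => decide ((b.2 : Int) < a.2)) x (S.map (fun p => p.2)) =
        (PySem.List.insertBy (fun a b => decide (pvKey a < pvKey b)) (n, x) S).map (fun p => p.2) := by
  intro S
  induction S with
  | nil => intro _; simp [PySem.List.insertBy]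
  | cons q S ih =>
    intro h
    have hq : q.1 < n := h q List.mem_cons_self
    have hcond : decide ((q.2.2 : Int) < x.2) = decide (pvKey (n, x) < pvKey q) := by
      rw [Bool.eq_iff_iff]
      simp only [decide_eq_true_eq, pvKey, Prod.Lex.lt_iff, ofLex_toLex]
      omega
    by_cases hlt : (q.2.2 : Int) < x.2
    · have h2 : decide (pvKey (n, x) < pvKey q) = true := by rw [← hcond]; simpa using hlt
      simp only [List.map_cons, PySem.List.insertBy, decide_eq_true_eq, if_pos hlt, h2,
        if_true, List.map_cons]
    · have h2 : decide (pvKey (n, x) < pvKey q) = false := by rw [← hcond]; simpa using hlt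
      simp only [List.map_cons, PySem.List.insertBy, decide_eq_true_eq, if_neg hlt, h2,
        Bool.false_eq_true, if_false, List.map_cons]
      exact congrArg (q.2 :: ·) (ih (fun p hp => h p (List.mem_cons_of_mem _ hp)))

lemma pvSorted_rev_eq (m : List (String × Int)) :
    PySem.List.sorted m (fun x => x.2) true =
      (PySem.List.sorted (PySem.List.enumerate m 0) pvKey false).map (fun p => p.2) := by
  induction m using List.reverseRecOn with
  | nil => simp [PySem.List.sorted]
  | append_singleton m x ih =>
    have hA : PySem.List.sorted (m ++ [x]) (fun y => y.2) true =
        PySem.List.insertBy (fun a b => decide ((b.2 : Int) < a.2)) x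
          (PySem.List.sorted m (fun y => y.2) true) := by
      simp [PySem.List.sorted, List.foldl_append]
    have hE : PySem.List.enumerate (m ++ [x]) 0 =
        PySem.List.enumerate m 0 ++ [((m.length : Int), x)] := by
      rw [PySem.List.enumerate_append]
      simp [PySem.List.enumerate_cons, PySem.List.enumerate_nil]
    have hS : PySem.List.sorted (PySem.List.enumerate m 0 ++ [((m.length : Int), x)]) pvKey false =
        PySem.List.insertBy (fun a b => decide (pvKey a < pvKey b)) ((m.length : Int), x)
          (PySem.List.sorted (PySem.List.enumerate m 0) pvKey false) := by
      simp [PySem.List.sorted, List.foldl_append]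
    have hidx : ∀ p ∈ PySem.List.sorted (PySem.List.enumerate m 0) pvKey false,
        p.1 < (m.length : Int) := by
      intro p hp
      rw [PySem.List.mem_sorted] at hp
      obtain ⟨k, hk, rfl⟩ := (PySem.List.mem_enumerate_iff _ _ _).mp hp
      simpa using hk
    rw [hA, ih, hE, hS]
    exact pvInsertBy_snd x (m.length : Int) _ hidx

lemma pvE_pairwise (m : List (String × Int)) :
    (PySem.List.sorted (PySem.List.enumerate m 0) pvKey false).Pairwise (fun a b => pvKey a < pvKey b) := by
  have hle := PySem.List.sorted_pairwise (PySem.List.enumerate m 0) pvKey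
  have hperm := PySem.List.sorted_perm (PySem.List.enumerate m 0) pvKey false
  have hfst : ((PySem.List.sorted (PySem.List.enumerate m 0) pvKey false).map (fun p => p.1)).Nodup := by
    have hp := hperm.map (fun p => (p.1 : Int))
    rw [PySem.List.map_fst_enumerate] at hp
    exact hp.nodup_iff.mpr (PySem.List.nodup_pyRange_one _ _)
  have hne : (PySem.List.sorted (PySem.List.enumerate m 0) pvKey false).Pairwise
      (fun a b => a.1 ≠ b.1) := List.pairwise_map.mp hfst
  refine (hle.and hne).imp ?_
  rintro a b ⟨h1, h2⟩
  refine lt_of_le_of_ne h1 (fun he => h2 ?_)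
  simpa using congrArg (fun x => (ofLex x).2) he

-- ---- names / entries bookkeeping ----
lemma pvNames_eq (S : List (Int × (String × Int))) :
    (S.map (fun p => p.2)).filterMap (fun q => pvNormB q.1) = (S.filterMap pvF).map (fun q => q.1) := by
  induction S with
  | nil => rfl
  | cons p S ih =>
    cases h : pvNormB p.2.1 <;> simp [pvF, h, ih]

lemma pvDD_fo (P : List (String × (Int × Int))) :
    ∀ seen, pvDD seen (P.map (fun q => q.1)) = (pvFo seen P).map (fun q => q.1) := by
  induction P with
  | nil => intro seen; rfl
  | cons q P ih =>
    intro seen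
    by_cases h : PySem.Set.contains seen q.1 = true
    · simp only [List.map_cons, pvDD, pvFo, if_pos h, ih]
    · simp only [List.map_cons, pvDD, pvFo, if_neg h, ih]

-- ---- pvFo facts ----
lemma pvFo_sublist (P : List (String × (Int × Int))) : ∀ seen, (pvFo seen P).Sublist P := by
  induction P with
  | nil => intro seen; simp [pvFo]
  | cons q P ih =>
    intro seen
    by_cases h : PySem.Set.contains seen q.1 = true
    · simpa only [pvFo, if_pos h] using (ih seen).cons q
    · simpa only [pvFo, if_neg h] using (ih (PySem.Set.add seen q.1)).cons₂ q

lemma pvSet_contains_iff (s : PySem.Set String) (x : String) :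
    PySem.Set.contains s x = true ↔ x ∈ s := by
  simp [PySem.Set.contains]

lemma pvFo_mem (P : List (String × (Int × Int))) :
    ∀ seen q, q ∈ pvFo seen P → q ∈ P ∧ q.1 ∉ seen := by
  induction P with
  | nil => intro seen q h; simp [pvFo] at h
  | cons p P ih =>
    intro seen q h
    by_cases hc : PySem.Set.contains seen p.1 = true
    · simp only [pvFo, if_pos hc] at h
      exact ⟨List.mem_cons_of_mem _ (ih seen q h).1, (ih seen q h).2⟩
    · simp only [pvFo, if_neg hc] at h
      rcases List.mem_cons.mp h with rfl | h
      · exact ⟨List.mem_cons_self, fun hm => hc ((pvSet_contains_iff _ _).mpr hm)⟩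
      · have := ih _ q h
        refine ⟨List.mem_cons_of_mem _ this.1, fun hm => this.2 ?_⟩
        exact (PySem.Set.mem_add seen p.1 q.1).mpr (Or.inl hm)

lemma pvFo_min (P : List (String × (Int × Int))) (hP : P.Pairwise (fun a b => pvKey' a < pvKey' b)) :
    ∀ seen q, q ∈ pvFo seen P → ∀ r ∈ P, r.1 = q.1 → pvKey' q ≤ pvKey' r := by
  induction P with
  | nil => intro seen q h; simp [pvFo] at h
  | cons p P ih =>
    intro seen q h r hr hfst
    have hP' := List.pairwise_cons.mp hP
    by_cases hc : PySem.Set.contains seen p.1 = true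
    · simp only [pvFo, if_pos hc] at h
      rcases List.mem_cons.mp hr with rfl | hr
      · exact absurd ((pvSet_contains_iff _ _).mp hc) (hfst ▸ (pvFo_mem P seen q h).2)
      · exact ih hP'.2 seen q h r hr hfst
    · simp only [pvFo, if_neg hc] at h
      rcases List.mem_cons.mp h with rfl | h
      · rcases List.mem_cons.mp hr with rfl | hr
        · exact le_refl _
        · exact le_of_lt (hP'.1 r hr)
      · rcases List.mem_cons.mp hr with rfl | hr
        · have := (pvFo_mem P _ q h).2
          simp [PySem.Set.mem_add] at this
          exact absurd (hfst.symm) this.2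
        · exact ih hP'.2 _ q h r hr hfst

lemma pvFo_exists (P : List (String × (Int × Int))) :
    ∀ seen n, (∃ q ∈ P, q.1 = n) → n ∉ seen → ∃ q' ∈ pvFo seen P, q'.1 = n := by
  induction P with
  | nil => intro seen n h _; simp at h
  | cons p P ih =>
    intro seen n ⟨w, hw, hwn⟩ hn
    by_cases hc : PySem.Set.contains seen p.1 = true
    · rcases List.mem_cons.mp hw with rfl | hw
      · exact absurd ((pvSet_contains_iff _ _).mp hc) (hwn ▸ hn)
      · simpa only [pvFo, if_pos hc] using ih seen n ⟨w, hw, hwn⟩ hn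
    · by_cases hpn : p.1 = n
      · exact ⟨p, by simp only [pvFo, if_neg hc]; exact List.mem_cons_self, hpn⟩
      · have hw' : w ∈ P := by
          rcases List.mem_cons.mp hw with rfl | hw
          · exact absurd hwn hpn
          · exact hw
        have hn' : n ∉ PySem.Set.add seen p.1 := by
          intro hm
          rcases (PySem.Set.mem_add seen p.1 n).mp hm with hm | hm
          · exact hn hm
          · exact hpn hm.symm
        obtain ⟨q', hq', hq'n⟩ := ih _ n ⟨w, hw', hwn⟩ hn'
        exact ⟨q', by simp only [pvFo, if_neg hc]; exact List.mem_cons_of_mem _ hq', hq'n⟩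

lemma pvFo_nodup (P : List (String × (Int × Int))) :
    ∀ seen, ((pvFo seen P).map (fun q => q.1)).Nodup := by
  induction P with
  | nil => intro seen; simp [pvFo]
  | cons p P ih =>
    intro seen
    by_cases hc : PySem.Set.contains seen p.1 = true
    · simpa only [pvFo, if_pos hc] using ih seen
    · simp only [pvFo, if_neg hc, List.map_cons, List.nodup_cons]
      refine ⟨?_, ih _⟩
      intro hm
      obtain ⟨y, hy, hy1⟩ := List.mem_map.mp hm
      have := (pvFo_mem P _ y hy).2
      exact this ((PySem.Set.mem_add seen p.1 y.1).mpr (Or.inr hy1))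

-- ---- pvBestL facts ----
lemma pvBestL_append (l : List (String × (Int × Int))) (q : String × (Int × Int)) (n : String) :
    pvBestL (l ++ [q]) n =
      if q.1 = n then
        match pvBestL l n with
        | none => some q.2
        | some c => if c.1 < q.2.1 then some q.2 else some c
      else pvBestL l n := by
  simp only [pvBestL, List.foldl_append, List.foldl_cons, List.foldl_nil]
  cases h : List.foldl _ (none : Option (Int × Int)) l <;> (split_ifs <;> rfl)

lemma pvBestL_none (l : List (String × (Int × Int))) (n : String) :
    pvBestL l n = none → ∀ v, (n, v) ∉ l := by
  induction l using List.reverseRecOn with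
  | nil => intro _ v; simp
  | append_singleton l q ih =>
    intro h v hv
    rw [pvBestL_append] at h
    by_cases hq : q.1 = n
    · rw [if_pos hq] at h
      cases hb : pvBestL l n <;> simp [hb] at h <;> split at h <;> simp_all
    · rw [if_neg hq] at h
      rcases List.mem_append.mp hv with hv | hv
      · exact ih h v hv
      · simp at hv; exact hq (by rw [← hv])

lemma pvKey'_le_iff (n : String) (v w : Int × Int) :
    pvKey' (n, v) ≤ pvKey' (n, w) ↔ (w.1 < v.1 ∨ (v.1 = w.1 ∧ v.2 ≤ w.2)) := by
  simp only [pvKey', Prod.Lex.le_iff, ofLex_toLex]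
  constructor
  · rintro (h | ⟨h1, h2⟩)
    · exact Or.inl (by omega)
    · exact Or.inr ⟨by omega, h2⟩
  · rintro (h | ⟨h1, h2⟩)
    · exact Or.inl (by omega)
    · exact Or.inr ⟨by omega, h2⟩

lemma pvBestL_min (l : List (String × (Int × Int))) (hl : l.Pairwise (fun a b => a.2.2 < b.2.2))
    (n : String) (v : Int × Int) (h : pvBestL l n = some v) :
    (n, v) ∈ l ∧ ∀ w, (n, w) ∈ l → pvKey' (n, v) ≤ pvKey' (n, w) := by
  induction l using List.reverseRecOn generalizing v with
  | nil => simp [pvBestL] at h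
  | append_singleton l q ih =>
    have hl' := (List.pairwise_append.mp hl).1
    have hcross : ∀ a ∈ l, a.2.2 < q.2.2 := by
      intro a ha
      exact (List.pairwise_append.mp hl).2.2 a ha q (List.mem_singleton.mpr rfl)
    rw [pvBestL_append] at h
    by_cases hq : q.1 = n
    · rw [if_pos hq] at h
      cases hb : pvBestL l n with
      | none =>
        rw [hb] at h; simp at h
        subst h
        refine ⟨List.mem_append.mpr (Or.inr (by simp [← hq])), ?_⟩
        intro w hw
        rcases List.mem_append.mp hw with hw | hw
        · exact absurd hw (pvBestL_none l n hb w)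
        · rw [List.mem_singleton] at hw
          exact le_of_eq (by rw [← hw])
      | some c =>
        rw [hb] at h
        obtain ⟨hcmem, hcmin⟩ := ih hl' c hb
        by_cases hlt : c.1 < q.2.1
        · obtain rfl : v = q.2 := by simpa [hlt] using h.symm
          refine ⟨List.mem_append.mpr (Or.inr (by simp [← hq])), ?_⟩
          intro w hw
          rcases List.mem_append.mp hw with hw | hw
          · have := hcmin w hw
            rw [pvKey'_le_iff] at this ⊢
            exact Or.inl (by omega)
          · rw [List.mem_singleton] at hw
            exact le_of_eq (by rw [← hw])
        · obtain rfl : v = c := by simpa [hlt] using h.symm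
          refine ⟨List.mem_append.mpr (Or.inl hcmem), ?_⟩
          intro w hw
          rcases List.mem_append.mp hw with hw | hw
          · exact hcmin w hw
          · rw [List.mem_singleton] at hw
            have hw2 : w = q.2 := congrArg Prod.snd hw
            subst hw2
            rw [pvKey'_le_iff]
            by_cases he : q.2.1 = v.1
            · exact Or.inr ⟨he.symm, le_of_lt (hcross _ hcmem)⟩
            · exact Or.inl (by omega)
    · rw [if_neg hq] at h
      obtain ⟨hm, hmin⟩ := ih hl' v h
      refine ⟨List.mem_append.mpr (Or.inl hm), ?_⟩
      intro w hw
      rcases List.mem_append.mp hw with hw | hw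
      · exact hmin w hw
      · rw [List.mem_singleton] at hw; exact absurd (congrArg Prod.fst hw).symm hq

-- ---- the dict built by B computes pvBestL ----
lemma pvDict_get? (es : List (Int × (String × Int))) (n : String) :
    (es.foldl pvStepB PySem.Dict.empty).get? n = pvBestL (es.filterMap pvF) n := by
  induction es using List.reverseRecOn generalizing n with
  | nil => simp [pvBestL, PySem.Dict.get?_empty]
  | append_singleton es p ih =>
    rw [List.foldl_append, List.foldl_cons, List.foldl_nil, List.filterMap_append]
    cases hf : pvNormB p.2.1 with
    | none =>
      have : pvF p = none := by simp [pvF, hf]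
      simp only [List.filterMap, this]
      simpa [pvStepB, hf] using ih n
    | some nm =>
      have hFp : pvF p = some (nm, (p.2.2, p.1)) := by simp [pvF, hf]
      simp only [List.filterMap, hFp, pvBestL_append]
      simp only [pvStepB, hf]
      cases hD : (es.foldl pvStepB PySem.Dict.empty).get? nm with
      | none =>
        dsimp only
        by_cases hn : nm = n
        · subst hn
          rw [if_pos rfl, PySem.Dict.get?_insert_self, ← ih nm, hD]
        · rw [if_neg hn, PySem.Dict.get?_insert_of_ne _ _ (Ne.symm hn), ih n]
      | some cur =>
        dsimp only
        by_cases hlt : cur.1 < p.2.2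
        · rw [if_pos hlt]
          by_cases hn : nm = n
          · subst hn
            rw [if_pos rfl, PySem.Dict.get?_insert_self, ← ih nm, hD]
            simp [hlt]
          · rw [if_neg hn, PySem.Dict.get?_insert_of_ne _ _ (Ne.symm hn), ih n]
        · rw [if_neg hlt]
          by_cases hn : nm = n
          · subst hn
            rw [if_pos rfl, ih nm, ← ih nm, hD]
            simp [hlt]
          · rw [if_neg hn, ih n]

lemma pvDict_nodup (es : List (Int × (String × Int))) :
    (es.foldl pvStepB PySem.Dict.empty).keys.Nodup := by
  induction es using List.reverseRecOn with
  | nil => exact PySem.Dict.nodup_keys_empty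
  | append_singleton es p ih =>
    rw [List.foldl_append, List.foldl_cons, List.foldl_nil]
    cases hf : pvNormB p.2.1 with
    | none => simpa only [pvStepB, hf] using ih
    | some nm =>
      simp only [pvStepB, hf]
      cases hD : (es.foldl pvStepB PySem.Dict.empty).get? nm with
      | none => exact PySem.Dict.nodup_keys_insert _ _ _ ih
      | some cur =>
        dsimp only
        by_cases hlt : cur.1 < p.2.2
        · rw [if_pos hlt]; exact PySem.Dict.nodup_keys_insert _ _ _ ih
        · rw [if_neg hlt]; exact ih

-- ---- tying it together ----
lemma pvKey'_pvF (a : Int × (String × Int)) (c : String × (Int × Int)) (h : pvF a = some c) :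
    pvKey' c = pvKey a := by
  cases hn : pvNormB a.2.1 <;> simp [pvF, hn] at h
  rw [← h]
  rfl

lemma pvIdx_pvF (a : Int × (String × Int)) (c : String × (Int × Int)) (h : pvF a = some c) :
    c.2.2 = a.1 := by
  cases hn : pvNormB a.2.1 <;> simp [pvF, hn] at h
  rw [← h]

lemma pvKey'_injective (n : String) (v w : Int × Int) (h : pvKey' (n, v) = pvKey' (n, w)) : v = w := by
  simp only [pvKey', toLex_inj, Prod.mk.injEq] at h
  exact Prod.ext (by omega) h.2

lemma pvP_pairwise (m : List (String × Int)) :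
    ((PySem.List.sorted (PySem.List.enumerate m 0) pvKey false).filterMap pvF).Pairwise
      (fun a b => pvKey' a < pvKey' b) := by
  refine List.pairwise_filterMap.mpr ((pvE_pairwise m).imp ?_)
  intro a b hab c hc d hd
  rw [pvKey'_pvF a c hc, pvKey'_pvF b d hd]
  exact hab

lemma pvEnts_idx_pairwise (m : List (String × Int)) :
    ((PySem.List.enumerate m 0).filterMap pvF).Pairwise (fun a b => a.2.2 < b.2.2) := by
  refine List.pairwise_filterMap.mpr ((PySem.List.pairwise_lt_enumerate m 0).imp ?_)
  intro a b hab c hc d hd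
  rw [pvIdx_pvF a c hc, pvIdx_pvF b d hd]
  exact hab

lemma pvM_sub (m : List (String × Int)) (q : String × (Int × Int))
    (hM : q ∈ pvFo PySem.Set.empty ((PySem.List.sorted (PySem.List.enumerate m 0) pvKey false).filterMap pvF)) :
    q ∈ ((PySem.List.enumerate m 0).foldl pvStepB PySem.Dict.empty).items := by
  have hperm : ((PySem.List.sorted (PySem.List.enumerate m 0) pvKey false).filterMap pvF).Perm
      ((PySem.List.enumerate m 0).filterMap pvF) :=
    (PySem.List.sorted_perm (PySem.List.enumerate m 0) pvKey false).filterMap pvF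
  have hqP := (pvFo_mem _ _ q hM).1
  have hmin := pvFo_min _ (pvP_pairwise m) _ q hM
  have hqE : (q.1, q.2) ∈ (PySem.List.enumerate m 0).filterMap pvF := hperm.mem_iff.mp hqP
  cases hbv : pvBestL ((PySem.List.enumerate m 0).filterMap pvF) q.1 with
  | none => exact absurd hqE (pvBestL_none _ _ hbv q.2)
  | some v =>
    obtain ⟨hvmem, hvmin⟩ := pvBestL_min _ (pvEnts_idx_pairwise m) _ _ hbv
    have h1 : pvKey' (q.1, v) ≤ pvKey' (q.1, q.2) := hvmin q.2 hqE
    have h2 : pvKey' (q.1, q.2) ≤ pvKey' (q.1, v) := by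
      have := hmin (q.1, v) (hperm.mem_iff.mpr hvmem) rfl
      simpa using this
    have hv : v = q.2 := pvKey'_injective q.1 v q.2 (le_antisymm h1 h2)
    subst hv
    have hget : ((PySem.List.enumerate m 0).foldl pvStepB PySem.Dict.empty).get? q.1 = some q.2 := by
      rw [pvDict_get?]; exact hbv
    exact (PySem.Dict.get?_eq_some_iff_mem_items _ q.1 q.2 (pvDict_nodup _)).mp hget

lemma pvM_perm_items (m : List (String × Int)) :
    (pvFo PySem.Set.empty ((PySem.List.sorted (PySem.List.enumerate m 0) pvKey false).filterMap pvF)).Perm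
      ((PySem.List.enumerate m 0).foldl pvStepB PySem.Dict.empty).items := by
  have hperm : ((PySem.List.sorted (PySem.List.enumerate m 0) pvKey false).filterMap pvF).Perm
      ((PySem.List.enumerate m 0).filterMap pvF) :=
    (PySem.List.sorted_perm (PySem.List.enumerate m 0) pvKey false).filterMap pvF
  have hndM : (pvFo PySem.Set.empty ((PySem.List.sorted (PySem.List.enumerate m 0) pvKey false).filterMap pvF)).Nodup :=
    (pvFo_nodup _ _).of_map
  have hndI : ((PySem.List.enumerate m 0).foldl pvStepB PySem.Dict.empty).items.Nodup := by
    have := pvDict_nodup (PySem.List.enumerate m 0)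
    exact List.Nodup.of_map _ this
  refine (List.perm_ext_iff_of_nodup hndM hndI).mpr ?_
  intro q
  constructor
  · exact pvM_sub m q
  · intro hI
    have hget : ((PySem.List.enumerate m 0).foldl pvStepB PySem.Dict.empty).get? q.1 = some q.2 :=
      (PySem.Dict.get?_eq_some_iff_mem_items _ q.1 q.2 (pvDict_nodup _)).mpr (by simpa using hI)
    rw [pvDict_get?] at hget
    have hqE : (q.1, q.2) ∈ (PySem.List.enumerate m 0).filterMap pvF :=
      (pvBestL_min _ (pvEnts_idx_pairwise m) _ _ hget).1
    have hqP : (q.1, q.2) ∈ (PySem.List.sorted (PySem.List.enumerate m 0) pvKey false).filterMap pvF :=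
      hperm.mem_iff.mpr hqE
    obtain ⟨q', hq'M, hq'1⟩ := pvFo_exists _ PySem.Set.empty q.1
      ⟨(q.1, q.2), hqP, rfl⟩ (by simp [PySem.Set.empty])
    have hq'I := pvM_sub m q' hq'M
    have hget' : ((PySem.List.enumerate m 0).foldl pvStepB PySem.Dict.empty).get? q'.1 = some q'.2 :=
      (PySem.Dict.get?_eq_some_iff_mem_items _ q'.1 q'.2 (pvDict_nodup _)).mpr (by simpa using hq'I)
    rw [pvDict_get?, hq'1, hget] at hget'
    have : q' = q := by
      have h2 : q'.2 = q.2 := by injection hget'.symm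
      exact Prod.ext hq'1 h2
    rw [← this]
    exact hq'M

lemma pvSorted2_eq_sorted (I : List (String × (Int × Int))) :
    PySem.List.sorted2 I (fun kv => -kv.2.1) (fun kv => kv.2.2) false =
      PySem.List.sorted I pvKey' false := by
  have hb : (fun (a b : String × (Int × Int)) => decide ((-a.2.1 : Int) < -b.2.1) || (!decide ((-b.2.1 : Int) < -a.2.1) && decide (a.2.2 < b.2.2))) = (fun a b => decide (pvKey' a < pvKey' b)) := by
    funext a b
    rw [Bool.eq_iff_iff]
    simp only [Bool.or_eq_true, Bool.and_eq_true, Bool.not_eq_eq_eq_not, Bool.not_true,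
      decide_eq_true_eq, decide_eq_false_iff_not, pvKey', Prod.Lex.lt_iff, ofLex_toLex]
    omega
  simp only [PySem.List.sorted2, PySem.List.sorted,
    if_neg (by simp : ¬ (false = true)), hb]

theorem pick_relevant_subreddits_py_spec : Claim_equal_pick_relevant_subreddits_py := by
  unfold Claim_equal_pick_relevant_subreddits_py
  intro m limit _
  unfold Spec_pick_relevant_subreddits_py
  have hMpw := (pvP_pairwise m).sublist (pvFo_sublist _ PySem.Set.empty)
  have h1 : pick_relevant_subreddits_py_alt m limit =
      ((pvFo PySem.Set.empty ((PySem.List.sorted (PySem.List.enumerate m 0) pvKey false).filterMap pvF)).map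
        (fun q => q.1)).take (max limit 1).toNat := by
    unfold pick_relevant_subreddits_py_alt
    rw [pvEmitB_eq limit _ [] (by simp only [List.length_nil, Nat.cast_zero]; omega)]
    simp only [List.nil_append]
    congr 1
    rw [pvSorted2_eq_sorted,
      PySem.List.sorted_eq_of_perm_of_pairwise_lt _ _ pvKey' (pvM_perm_items m) hMpw]
  have h2 : pick_relevant_subreddits_py m limit =
      ((pvFo PySem.Set.empty ((PySem.List.sorted (PySem.List.enumerate m 0) pvKey false).filterMap pvF)).map
        (fun q => q.1)).take (max limit 1).toNat := by
    unfold pick_relevant_subreddits_py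
    by_cases hm : m = []
    · subst hm
      simp [pvFo, PySem.List.sorted, PySem.List.enumerate]
    · rw [if_neg hm,
        pvLoopA_eq limit _ [] PySem.Set.empty (by simp only [List.length_nil, Nat.cast_zero]; omega),
        pvSorted_rev_eq, pvNames_eq, pvDD_fo]
      simp
  rw [h1, h2]
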